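-- pv_equiv track=rewrite | github.com/sayashm/Programming2024-2025 | Reeks_07/werkelijkheid_en_fictie.py | find_last_alpha_decode
-- ===== SOURCE A (Python) =====
-- def find_last_alpha_decode(message: str, current_index: int, decoded_res: list) -> str:
--
--     for j in range(current_index - 1, -1, -1):
--         if message[j].isalpha():
--             if j < len(decoded_res):
--                 return decoded_res[j]
--             else:
--                 return None
--     return None
-- ===== SOURCE B (Python) =====
-- def find_last_alpha_decode(message: str, current_index: int, decoded_res: list) -> str:
--     last_idx = None
--     for j in range(current_index):
--         if message[j].isalpha():
--             last_idx = j
--     if last_idx is None: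
--         return None
--     return decoded_res[last_idx] if last_idx < len(decoded_res) else None
-- ===== Notes on version B (the rewrite author's own statement) =====
-- stated objective: alternative
-- what changed: Replaces A's backward scan with early return (first alpha found below the index wins) by a forward left-to-right pass that keeps overwriting the last alpha index and decodes it once after the loop.
import Mathlib
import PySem

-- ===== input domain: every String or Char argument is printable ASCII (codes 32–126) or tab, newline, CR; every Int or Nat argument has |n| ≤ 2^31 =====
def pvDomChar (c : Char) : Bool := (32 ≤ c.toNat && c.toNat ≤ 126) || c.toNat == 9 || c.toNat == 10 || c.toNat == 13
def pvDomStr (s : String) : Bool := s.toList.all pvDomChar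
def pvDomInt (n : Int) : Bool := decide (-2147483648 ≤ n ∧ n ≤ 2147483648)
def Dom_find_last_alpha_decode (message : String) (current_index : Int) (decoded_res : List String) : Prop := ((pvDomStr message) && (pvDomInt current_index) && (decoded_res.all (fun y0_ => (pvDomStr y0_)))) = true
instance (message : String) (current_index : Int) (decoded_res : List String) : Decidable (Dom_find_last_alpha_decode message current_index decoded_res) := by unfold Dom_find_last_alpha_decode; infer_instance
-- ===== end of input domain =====

-- B replaces A's backward early-return scan by a forward pass that keeps the last alpha index; return values only.

-- ===== PORT A =====
-- message[j].isalpha() for an in-range index j (out-of-range is excluded by Pre_; treated as false here)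
def pvAlphaAt (cs : List Char) (j : Nat) : Bool :=
  match cs[j]? with
  | some c => PySem.Chars.isalpha c
  | none => false

-- the backward loop 'for j in range(current_index-1, -1, -1)', recursing on j
def pvFindA (cs : List Char) (d : List String) : Nat → Option String
  | 0 => if pvAlphaAt cs 0 then (if 0 < d.length then d[0]? else none) else none
  | k + 1 =>
    if pvAlphaAt cs (k + 1) then (if k + 1 < d.length then d[k + 1]? else none)
    else pvFindA cs d k

def find_last_alpha_decode (message : String) (current_index : Int) (decoded_res : List String) : Option String :=
  if current_index ≤ 0 then none
  else pvFindA message.toList decoded_res (current_index - 1).toNat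

-- ===== PORT B =====
-- decode the recorded last alpha index (the code after B's loop)
def pvFinish (d : List String) : Option Nat → Option String
  | none => none
  | some j => if j < d.length then d[j]? else none

def find_last_alpha_decode_alt (message : String) (current_index : Int) (decoded_res : List String) : Option String :=
  let cs := message.toList
  let last := (List.range current_index.toNat).foldl
    (fun acc j => if pvAlphaAt cs j then some j else acc) none
  pvFinish decoded_res last

-- ===== PRECONDITION & SPEC =====
-- Pre_ excludes exactly the inputs where Python A raises IndexError: current_index - 1 beyond the message.
def Pre_find_last_alpha_decode (message : String) (current_index : Int) (decoded_res : List String) : Prop :=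
  current_index ≤ message.toList.length
instance (message : String) (current_index : Int) (decoded_res : List String) : Decidable (Pre_find_last_alpha_decode message current_index decoded_res) := by unfold Pre_find_last_alpha_decode; infer_instance
def pvWitness_find_last_alpha_decode : String × Int × List String := ("ab3c", 3, ["x", "y", "z"])
def Spec_find_last_alpha_decode (message : String) (current_index : Int) (decoded_res : List String) (out : Option String) : Prop := out = find_last_alpha_decode_alt message current_index decoded_res
instance (message : String) (current_index : Int) (decoded_res : List String) (out : Option String) : Decidable (Spec_find_last_alpha_decode message current_index decoded_res out) := by unfold Spec_find_last_alpha_decode; infer_instance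

-- ===== CLAIM (what is proved, stated in full; the proofs are below) =====
def Claim_equal_find_last_alpha_decode : Prop := ∀ (message : String) (current_index : Int) (decoded_res : List String), Dom_find_last_alpha_decode message current_index decoded_res → Pre_find_last_alpha_decode message current_index decoded_res → Spec_find_last_alpha_decode message current_index decoded_res (find_last_alpha_decode message current_index decoded_res)

-- ===== LEMMAS AND PROOFS =====
lemma pvFindA_eq_fold (cs : List Char) (d : List String) :
    ∀ j : Nat, pvFindA cs d j =
      pvFinish d ((List.range (j + 1)).foldl (fun acc i => if pvAlphaAt cs i then some i else acc) none) := by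
  intro j
  induction j with
  | zero =>
      by_cases h : pvAlphaAt cs 0 <;> simp [pvFindA, h, pvFinish, List.range_succ]
  | succ k ih =>
      rw [List.range_succ, List.foldl_append]
      by_cases h : pvAlphaAt cs (k + 1)
      · simp [pvFindA, h, pvFinish]
      · simpa [pvFindA, h] using ih

-- ===== VERDICT (by name: the statement is the Claim_ definition above) =====
theorem find_last_alpha_decode_spec : Claim_equal_find_last_alpha_decode := by
  intro message ci d _ _
  unfold Spec_find_last_alpha_decode find_last_alpha_decode find_last_alpha_decode_alt
  by_cases h : ci ≤ 0
  · have : ci.toNat = 0 := by omega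
    simp [h, this, pvFinish]
  · have h1 : ci.toNat = (ci - 1).toNat + 1 := by omega
    simp only [h, if_false]
    rw [pvFindA_eq_fold, h1]
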